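-- pv_equiv track=rewrite | github.com/Abdumajid05/list_search | find05_max_even.py | find_max_even
-- ===== SOURCE A (Python) =====
-- def find_max_even(data):
--     """
--     Given the list of numbers, Find the maximum even number in the list
--     args:
--         data: list of numbers
--     returns: maximum even number in the list
--     """
--     i=0
--     list=[]
--     while i<len(data):
--         if data[i]%2==0:
--             list.append(data[i])
--         i+=1
--     return max(list)
-- ===== SOURCE B (Python) =====
-- def find_max_even(data):
--     """
--     Given the list of numbers, Find the maximum even number in the list
--     args:
--         data: list of numbers
--     returns: maximum even number in the list
--     """
--     best = None
--     for x in data: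
--         if x % 2 == 0 and (best is None or x > best):
--             best = x
--     if best is None:
--         raise ValueError("max() arg is an empty sequence")
--     return best
-- ===== Notes on version B (the rewrite author's own statement) =====
-- stated objective: simpler
-- what changed: One pass keeping a running best scalar instead of building an intermediate list of evens and calling max on it; raises the same ValueError when there is no even element.
import Mathlib
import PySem

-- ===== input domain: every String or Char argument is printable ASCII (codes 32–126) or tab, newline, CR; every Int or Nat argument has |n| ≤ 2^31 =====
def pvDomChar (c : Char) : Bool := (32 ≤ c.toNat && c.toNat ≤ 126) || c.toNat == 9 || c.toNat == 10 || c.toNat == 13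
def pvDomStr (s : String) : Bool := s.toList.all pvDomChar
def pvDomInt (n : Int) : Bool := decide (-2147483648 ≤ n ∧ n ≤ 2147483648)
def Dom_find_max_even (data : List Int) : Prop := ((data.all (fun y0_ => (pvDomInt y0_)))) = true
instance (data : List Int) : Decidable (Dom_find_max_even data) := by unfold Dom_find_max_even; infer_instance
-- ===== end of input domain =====

-- B is a single pass keeping a running best scalar instead of building the list of evens and calling max.
-- Both A and B raise ValueError when the list has no even element; Pre_ excludes exactly those inputs.

-- ===== PORT A =====
-- while loop over indices collecting the evens, then max(list); max on the empty list raises (excluded by Pre_)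
def find_max_even (data : List Int) : Int :=
  (PySem.List.max? (data.foldl (fun acc x => if PySem.Int.mod x 2 = 0 then acc ++ [x] else acc) []) (fun y => y)).getD 0

-- ===== PORT B =====
-- if x % 2 == 0 and (best is None or x > best): best = x
def pvBestStep (best : Option Int) (x : Int) : Option Int :=
  if PySem.Int.mod x 2 = 0 then
    match best with
    | none => some x
    | some b => if b < x then some x else best
  else best

def find_max_even_alt (data : List Int) : Int :=
  (data.foldl pvBestStep none).getD 0

-- ===== PRECONDITION & SPEC =====
-- Pre_ excludes exactly the inputs with no even element, where both Pythons raise ValueError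
def Pre_find_max_even (data : List Int) : Prop := ∃ x ∈ data, PySem.Int.mod x 2 = 0
instance (data : List Int) : Decidable (Pre_find_max_even data) := by unfold Pre_find_max_even; infer_instance
def pvWitness_find_max_even : List Int := [3, 4, 7, 2]

def Spec_find_max_even (data : List Int) (out : Int) : Prop := out = find_max_even_alt data
instance (data : List Int) (out : Int) : Decidable (Spec_find_max_even data out) := by unfold Spec_find_max_even; infer_instance

-- ===== CLAIM (what is proved, stated in full; the proofs are below) =====
def Claim_equal_find_max_even : Prop := ∀ (data : List Int), Dom_find_max_even data → Pre_find_max_even data → Spec_find_max_even data (find_max_even data)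

-- ===== LEMMAS AND PROOFS =====

/-- running-max view of a list: `none` iff empty, else the running max. -/
def pvMOf (l : List Int) : Option Int :=
  match l with
  | [] => none
  | x :: t => some (t.foldl max x)

theorem pvMOf_append (acc : List Int) (x : Int) :
    pvMOf (acc ++ [x]) = some ((pvMOf acc).elim x (fun b => max b x)) := by
  cases acc with
  | nil => simp [pvMOf]
  | cons a t => simp [pvMOf, List.foldl_append]

theorem pvMOf_eq_max? (l : List Int) :
    pvMOf l = PySem.List.max? l (fun y => y) := by
  cases l with
  | nil => rfl
  | cons x t => rw [PySem.List.max?_id_cons]; rfl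

theorem pv_inv (data : List Int) (acc : List Int) :
    pvMOf (data.foldl (fun acc x => if PySem.Int.mod x 2 = 0 then acc ++ [x] else acc) acc)
      = data.foldl pvBestStep (pvMOf acc) := by
  induction data generalizing acc with
  | nil => rfl
  | cons x rest ih =>
    simp only [List.foldl_cons]
    by_cases hx : PySem.Int.mod x 2 = 0
    · rw [if_pos hx]
      have hstep : pvBestStep (pvMOf acc) x = pvMOf (acc ++ [x]) := by
        rw [pvMOf_append]
        cases h : pvMOf acc with
        | none => unfold pvBestStep; rw [if_pos hx]; rfl
        | some b =>
          simp only [pvBestStep, if_pos hx, Option.elim]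
          by_cases hb : b < x
          · rw [if_pos hb]; rw [max_eq_right (le_of_lt hb)]
          · rw [if_neg hb]; rw [max_eq_left (by omega)]
      rw [ih, hstep]
    · rw [if_neg hx]
      have : pvBestStep (pvMOf acc) x = pvMOf acc := by
        unfold pvBestStep; rw [if_neg hx]
      rw [ih, this]

-- ===== VERDICT (by name: the statement is the Claim_ definition above) =====
theorem find_max_even_spec : Claim_equal_find_max_even := by
  intro data _ _
  show find_max_even data = find_max_even_alt data
  unfold find_max_even find_max_even_alt
  rw [← pvMOf_eq_max?, pv_inv data []]
  rfl
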